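-- pv_equiv track=rewrite | github.com/thalib/moon | scripts/api-check.py | extract_collection_name
-- ===== SOURCE A (Python) =====
-- def extract_collection_name(endpoint):
-- 	"""
-- 	Extracts the collection name from an endpoint.
-- 	E.g., "/products:get" -> "products"
-- 	"""
-- 	if '/' in endpoint:
-- 		endpoint = endpoint.split('?')[0]  # Remove query params
-- 		parts = endpoint.split('/')
-- 		for part in parts:
-- 			if ':' in part:
-- 				return part.split(':')[0]
-- 	return None
-- ===== SOURCE B (Python) =====
-- def extract_collection_name(endpoint):
--     """
--     Extracts the collection name from an endpoint.
--     E.g., "/products:get" -> "products"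
--     """
--     if '/' not in endpoint:
--         return None
--     buf = ''
--     for ch in endpoint:
--         if ch == '?':
--             break
--         if ch == '/':
--             buf = ''
--         elif ch == ':':
--             return buf
--         else:
--             buf += ch
--     return None
-- ===== Notes on version B (the rewrite author's own statement) =====
-- stated objective: alternative
-- what changed: Replaces the split('?') / split('/') / inner split(':') passes with a single left-to-right character scan that keeps the current segment in a buffer, resets it on '/', stops on '?' and returns the buffer at the first ':'.
import Mathlib
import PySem

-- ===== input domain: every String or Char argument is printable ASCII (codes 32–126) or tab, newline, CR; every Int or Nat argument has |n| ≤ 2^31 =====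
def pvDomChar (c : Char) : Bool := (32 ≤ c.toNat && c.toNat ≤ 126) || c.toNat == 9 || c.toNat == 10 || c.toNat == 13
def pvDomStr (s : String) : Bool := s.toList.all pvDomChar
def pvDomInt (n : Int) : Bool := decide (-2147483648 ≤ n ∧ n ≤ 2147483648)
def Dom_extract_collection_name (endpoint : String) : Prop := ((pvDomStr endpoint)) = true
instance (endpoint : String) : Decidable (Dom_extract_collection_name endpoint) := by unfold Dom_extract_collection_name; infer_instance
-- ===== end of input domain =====

-- B replaces A's three split passes by one character scan with a segment buffer (alternative decomposition, same cost).

-- ===== PORT A =====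
-- the 'for part in parts: if ':' in part: return …' loop
def loopA : List (List Char) → Option String
  | [] => none
  | p :: rest =>
      if PySem.Chars.isIn [':'] p then
        -- part.split(':')[0]; split results are always nonempty, so [0] = headD
        some (String.ofList ((PySem.Chars.splitOn p [':']).headD []))
      else loopA rest

def extract_collection_name (endpoint : String) : Option String :=
  if PySem.Str.isIn "/" endpoint then
    -- endpoint = endpoint.split('?')[0]; parts = endpoint.split('/')
    -- (split results are always nonempty, so [0] = headD)
    loopA (PySem.Chars.splitOn ((PySem.Chars.splitOn endpoint.toList ['?']).headD []) ['/'])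
  else none

-- ===== PORT B =====
-- the for-ch loop: buf is the current segment so far; '?' breaks, '/' resets, ':' returns buf
def scanB : List Char → List Char → Option String
  | [], _ => none
  | c :: t, buf =>
      if c = '?' then none
      else if c = '/' then scanB t []
      else if c = ':' then some (String.ofList buf)
      else scanB t (buf ++ [c])

def extract_collection_name_alt (endpoint : String) : Option String :=
  if PySem.Str.isIn "/" endpoint then scanB endpoint.toList [] else none

-- ===== PRECONDITION & SPEC =====
def Spec_extract_collection_name (endpoint : String) (out : Option String) : Prop := out = extract_collection_name_alt endpoint
instance (endpoint : String) (out : Option String) : Decidable (Spec_extract_collection_name endpoint out) := by unfold Spec_extract_collection_name; infer_instance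

-- ===== CLAIM (what is proved, stated in full; the proofs are below) =====
def Claim_equal_extract_collection_name : Prop := ∀ (endpoint : String), Dom_extract_collection_name endpoint → Spec_extract_collection_name endpoint (extract_collection_name endpoint)

-- ===== LEMMAS AND PROOFS =====

/-- Simple structural single-character split, used to characterise `PySem.Chars.splitOn`. -/
def mySplit (sep : Char) : List Char → List (List Char)
  | [] => [[]]
  | c :: t => if c = sep then [] :: mySplit sep t
              else match mySplit sep t with
                   | [] => [[c]]
                   | h :: r => (c :: h) :: r

/-- prepend onto the head of a (nonempty) list of lists -/
def consHead (p : List Char) : List (List Char) → List (List Char)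
  | [] => [p]
  | h :: r => (p ++ h) :: r

theorem mySplit_ne_nil (sep : Char) (l : List Char) : mySplit sep l ≠ [] := by
  cases l with
  | nil => simp [mySplit]
  | cons c t =>
      simp only [mySplit]
      split
      · simp
      · split <;> simp_all

theorem consHead_nil_of_ne (xs : List (List Char)) (h : xs ≠ []) : consHead [] xs = xs := by
  cases xs with
  | nil => exact absurd rfl h
  | cons a r => simp [consHead]

theorem consHead_consHead (p q : List Char) (xs : List (List Char)) :
    consHead p (consHead q xs) = consHead (p ++ q) xs := by
  cases xs <;> simp [consHead]

theorem mySplit_cons_ne (sep c : Char) (t : List Char) (h : c ≠ sep) :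
    mySplit sep (c :: t) = consHead [c] (mySplit sep t) := by
  simp only [mySplit, if_neg h]
  cases hm : mySplit sep t with
  | nil => exact absurd hm (mySplit_ne_nil sep t)
  | cons a r => simp [consHead]

theorem splitOn_go_eq (sep : Char) (fuel : Nat) (l cur : List Char)
    (acc : List (List Char)) (hf : l.length < fuel) :
    PySem.Chars.splitOn.go [sep] fuel l cur acc
      = acc.reverse ++ consHead cur.reverse (mySplit sep l) := by
  induction fuel generalizing l cur acc with
  | zero => omega
  | succ fuel ih =>
      cases l with
      | nil => simp [PySem.Chars.splitOn.go, mySplit, consHead]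
      | cons c rest =>
          by_cases hc : c = sep
          · subst hc
            have hpre : [c].isPrefixOf (c :: rest) = true := by
              simp [List.isPrefixOf]
            rw [show PySem.Chars.splitOn.go [c] (fuel + 1) (c :: rest) cur acc
                  = PySem.Chars.splitOn.go [c] fuel (List.drop 1 (c :: rest)) []
                      (cur.reverse :: acc) by
                  simp [PySem.Chars.splitOn.go, hpre]]
            rw [ih (List.drop 1 (c :: rest)) [] (cur.reverse :: acc)
                  (by simpa using Nat.lt_of_succ_lt_succ hf)]
            simp only [List.reverse_nil, List.drop_one, List.tail_cons]
            rw [consHead_nil_of_ne _ (mySplit_ne_nil c rest)]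
            simp [mySplit, consHead]
          · have hpre : [sep].isPrefixOf (c :: rest) = false := by
              simp only [List.isPrefixOf, Bool.and_eq_false_iff, beq_eq_false_iff_ne, ne_eq]
              exact Or.inl (fun h => hc h.symm)
            rw [show PySem.Chars.splitOn.go [sep] (fuel + 1) (c :: rest) cur acc
                  = PySem.Chars.splitOn.go [sep] fuel rest (c :: cur) acc by
                  simp [PySem.Chars.splitOn.go, hpre]]
            rw [ih rest (c :: cur) acc (by simpa using Nat.lt_of_succ_lt_succ hf)]
            rw [mySplit_cons_ne sep c rest hc, consHead_consHead]
            simp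

theorem splitOn_eq_mySplit (sep : Char) (l : List Char) :
    PySem.Chars.splitOn l [sep] = mySplit sep l := by
  rw [show PySem.Chars.splitOn l [sep] = PySem.Chars.splitOn.go [sep] (l.length + 1) l [] [] from rfl]
  rw [splitOn_go_eq sep (l.length + 1) l [] [] (Nat.lt_succ_self _)]
  simp [consHead_nil_of_ne _ (mySplit_ne_nil sep l)]

theorem headD_mySplit (sep : Char) (l : List Char) :
    (mySplit sep l).headD [] = l.takeWhile (· ≠ sep) := by
  induction l with
  | nil => simp [mySplit]
  | cons c t ih =>
      by_cases hc : c = sep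
      · subst hc; simp [mySplit, List.takeWhile]
      · rw [mySplit_cons_ne sep c t hc]
        cases hm : mySplit sep t with
        | nil => exact absurd hm (mySplit_ne_nil sep t)
        | cons a r =>
            simp [consHead, List.takeWhile, hc]
            rw [hm] at ih; simpa using ih

theorem isIn_singleton (a : Char) (l : List Char) :
    PySem.Chars.isIn [a] l = true ↔ a ∈ l := by
  rw [PySem.Chars.isIn_iff_infix]
  constructor
  · rintro ⟨p, s, h⟩
    subst h; simp
  · intro h
    obtain ⟨p, s, h⟩ := List.append_of_mem h
    exact ⟨p, s, by simp [h]⟩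

theorem takeWhile_append_mid (buf t : List Char) (sep : Char) (hb : sep ∉ buf) :
    (buf ++ sep :: t).takeWhile (· ≠ sep) = buf := by
  induction buf with
  | nil => simp
  | cons c r ih =>
      have hc : c ≠ sep := fun h => hb (h ▸ List.mem_cons_self ..)
      have ih' := ih (fun h => hb (List.mem_cons_of_mem _ h))
      simp only [List.cons_append, List.takeWhile_cons]
      simp only [decide_not] at ih' ⊢
      simp [hc, ih']

theorem scanB_takeWhile (l buf : List Char) :
    scanB l buf = scanB (l.takeWhile (· ≠ '?')) buf := by
  induction l generalizing buf with
  | nil => simp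
  | cons c t ih =>
      by_cases hq : c = '?'
      · subst hq; simp [scanB]
      · by_cases hs : c = '/'
        · subst hs; simp [scanB, ih]
        · by_cases hcol : c = ':'
          · subst hcol; simp [scanB]
          · simp [scanB, hq, hs, hcol, ih]

theorem scanB_eq_loopA (l buf : List Char) (hq : '?' ∉ l) (hc : ':' ∉ buf) :
    scanB l buf = loopA (consHead buf (mySplit '/' l)) := by
  induction l generalizing buf with
  | nil =>
      have : PySem.Chars.isIn [':'] buf = false := by
        rw [Bool.eq_false_iff]
        intro h; exact hc ((isIn_singleton ':' buf).1 h)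
      simp [scanB, mySplit, consHead, loopA, this]
  | cons c t ih =>
      have hq' : '?' ∉ t := fun h => hq (List.mem_cons_of_mem _ h)
      have hcq : c ≠ '?' := fun h => hq (h ▸ List.mem_cons_self ..)
      by_cases hs : c = '/'
      · subst hs
        have hb : PySem.Chars.isIn [':'] buf = false := by
          rw [Bool.eq_false_iff]
          intro h; exact hc ((isIn_singleton ':' buf).1 h)
        rw [show scanB ('/' :: t) buf = scanB t [] from by simp [scanB],
            ih [] hq' (by simp),
            show mySplit '/' ('/' :: t) = [] :: mySplit '/' t from by simp [mySplit],
            consHead_nil_of_ne _ (mySplit_ne_nil '/' t)]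
        simp [consHead, loopA, hb]
      · by_cases hcol : c = ':'
        · subst hcol
          rw [mySplit_cons_ne '/' ':' t hs, consHead_consHead]
          cases hm : mySplit '/' t with
          | nil => exact absurd hm (mySplit_ne_nil '/' t)
          | cons a r =>
              have hin : PySem.Chars.isIn [':'] (buf ++ ':' :: a) = true :=
                (isIn_singleton ':' _).2 (by simp)
              simp only [consHead]
              rw [show buf ++ [':'] ++ a = buf ++ ':' :: a from by simp]
              simp only [loopA, hin, if_true]
              rw [splitOn_eq_mySplit, headD_mySplit, takeWhile_append_mid buf a ':' hc]
              simp [scanB]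
        · rw [mySplit_cons_ne '/' c t hs, consHead_consHead]
          simp only [scanB, if_neg hcq, if_neg hs, if_neg hcol]
          exact ih (buf ++ [c]) hq' (by
            intro h
            rcases List.mem_append.1 h with h | h
            · exact hc h
            · simp at h; exact hcol h.symm)

-- ===== VERDICT (by name: the statement is the Claim_ definition above) =====
theorem extract_collection_name_spec : Claim_equal_extract_collection_name := by
  intro endpoint _
  unfold Spec_extract_collection_name extract_collection_name extract_collection_name_alt
  by_cases h : PySem.Str.isIn "/" endpoint = true
  · rw [if_pos h, if_pos h, splitOn_eq_mySplit, splitOn_eq_mySplit, headD_mySplit, scanB_takeWhile,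
        scanB_eq_loopA _ [] (fun hm => by
          have := List.mem_takeWhile_imp hm
          simp at this) (by simp),
        consHead_nil_of_ne _ (mySplit_ne_nil '/' _)]
  · rw [if_neg h, if_neg h]
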